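-- pv_equiv track=rewrite | github.com/joshanashakya/dissertation | workspace/dataset/java-python/GeeksForGeeks/463/A/2.py | maximumOccurrence
-- ===== SOURCE A (Python) =====
-- def maximumOccurrence(s):
--     n = len(s)
--
--     # Frequencies of subsequence
--     freq = {}
--
--     # Loop to find the frequencies
--     # of subsequence of length 1
--     for i in s:
--         temp = ""
--         temp += i
--         freq[temp] = freq.get(temp, 0) + 1
--
--     # Loop to find the frequencies
--     # subsequence of length 2
--     for i in range(n):
--         for j in range(i + 1, n):
--             temp = ""
--             temp += s[i]
--             temp += s[j]
--             freq[temp] = freq.get(temp, 0) + 1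
--
--     answer = -10**9
--
--     # Finding maximum frequency
--     for it in freq:
--         answer = max(answer, freq[it])
--     return answer
-- ===== SOURCE B (Python) =====
-- def maximumOccurrence(s):
--     ans = -10**9
--     # distinct characters in first-occurrence order
--     chars = []
--     for c in s:
--         if c not in chars:
--             chars.append(c)
--     # best length-1 subsequence frequency
--     for a in chars:
--         k = 0
--         for c in s:
--             if c == a:
--                 k += 1
--         ans = max(ans, k)
--     # best length-2 subsequence frequency: one left-to-right pass per
--     # ordered pair (a, b), keeping a running count of a's seen so far
--     for a in chars:
--         for b in chars:
--             run = 0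
--             pc = 0
--             for c in s:
--                 if c == b:
--                     pc += run
--                 if c == a:
--                     run += 1
--             ans = max(ans, pc)
--     return ans
-- ===== Notes on version B (the rewrite author's own statement) =====
-- stated objective: faster
-- what changed: B drops A's dictionary of all O(n^2) index-pair strings and instead enumerates the distinct characters, taking the max of one counting pass per character and one running-prefix-count pass per ordered character pair (O(K^2*n) for alphabet size K).
import Mathlib
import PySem

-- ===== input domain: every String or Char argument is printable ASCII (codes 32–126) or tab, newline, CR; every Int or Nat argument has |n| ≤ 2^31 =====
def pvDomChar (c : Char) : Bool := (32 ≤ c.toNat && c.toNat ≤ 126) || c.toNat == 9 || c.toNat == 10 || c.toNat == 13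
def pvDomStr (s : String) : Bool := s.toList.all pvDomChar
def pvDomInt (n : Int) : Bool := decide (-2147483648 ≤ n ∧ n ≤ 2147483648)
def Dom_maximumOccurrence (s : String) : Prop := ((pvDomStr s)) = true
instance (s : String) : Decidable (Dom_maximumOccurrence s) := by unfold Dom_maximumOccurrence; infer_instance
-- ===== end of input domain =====

-- B replaces A's quadratic all-index-pairs dictionary with per-distinct-character scans
-- (one counting pass per character, one running-count pass per ordered character pair),
-- measured faster on the generated inputs.

-- ===== PORT A =====
-- literal transliteration of A; freq[it] in the final loop is ported as getD (the key is
-- always present, so Python's lookup cannot raise); s[i]/s[j] use pyGetD (indices from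
-- range(n) are always in range)
def maximumOccurrence (s : String) : Int :=
  let l := s.toList
  let n : Int := l.length
  let freq : PySem.Dict String Int := PySem.Dict.empty
  let freq := l.foldl (fun d i =>
      let temp := String.ofList [i]
      d.insert temp (d.getD temp 0 + 1)) freq
  let freq := (PySem.List.pyRange 0 n 1).foldl (fun d i =>
      (PySem.List.pyRange (i + 1) n 1).foldl (fun d j =>
        let temp := String.ofList [PySem.List.pyGetD l i ' ', PySem.List.pyGetD l j ' ']
        d.insert temp (d.getD temp 0 + 1)) d) freq
  let answer : Int := -10 ^ 9
  freq.keys.foldl (fun answer it => max answer (freq.getD it 0)) answer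

-- ===== PORT B =====
def maximumOccurrence_alt (s : String) : Int :=
  let l := s.toList
  let chars : PySem.Set Char := l.foldl (fun cs c => PySem.Set.add cs c) PySem.Set.empty
  let ans : Int := -10 ^ 9
  let ans := chars.foldl (fun a x =>
      max a (l.foldl (fun (k : Int) c => if c = x then k + 1 else k) 0)) ans
  chars.foldl (fun a x => chars.foldl (fun a y =>
      let p := l.foldl (fun (st : Int × Int) c =>
          ((if c = x then st.1 + 1 else st.1), (if c = y then st.2 + st.1 else st.2)))
          ((0 : Int), (0 : Int))
      max a p.2) a) ans

-- ===== PRECONDITION & SPEC =====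
def Spec_maximumOccurrence (s : String) (out : Int) : Prop := out = maximumOccurrence_alt s
instance (s : String) (out : Int) : Decidable (Spec_maximumOccurrence s out) := by unfold Spec_maximumOccurrence; infer_instance

-- ===== CLAIM (what is proved, stated in full; the proofs are below) =====
def Claim_equal_maximumOccurrence : Prop := ∀ (s : String), Dom_maximumOccurrence s → Spec_maximumOccurrence s (maximumOccurrence s)

-- ===== LEMMAS AND PROOFS =====

-- proof-side vocabulary ----------------------------------------------------

/-- the ordered pairs `s[i]s[j]`, `i < j`, in A's (i-major) generation order -/
def plist : List Char → List String
  | [] => []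
  | c :: t => t.map (fun d => String.ofList [c, d]) ++ plist t

/-- number of index pairs `i < j` with `l[i] = x`, `l[j] = y` -/
def pcnt (x y : Char) : List Char → Nat
  | [] => 0
  | c :: t => (if c = x then t.count y else 0) + pcnt x y t

/-- the multiset of keys A's dictionary counts, as one event list -/
def evts (l : List Char) : List String := l.map (fun c => String.ofList [c]) ++ plist l

-- max-fold machinery -------------------------------------------------------

theorem fmax_le_iff {α : Type} (f : α → Int) (xs : List α) (a c : Int) :
    xs.foldl (fun r x => max r (f x)) a ≤ c ↔ a ≤ c ∧ ∀ x ∈ xs, f x ≤ c := by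
    induction xs generalizing a with
  | nil => simp
  | cons h t ih =>
    simp only [List.foldl_cons, ih, max_le_iff, List.mem_cons]
    constructor
    · rintro ⟨⟨h1, h2⟩, h3⟩
      exact ⟨h1, fun x hx => hx.elim (fun e => e ▸ h2) (h3 x)⟩
    · rintro ⟨h1, h2⟩
      exact ⟨⟨h1, h2 h (Or.inl rfl)⟩, fun x hx => h2 x (Or.inr hx)⟩

theorem nmax_le_iff {α β : Type} (g : α → β → Int) (xs : List α) (ys : List β) (a c : Int) :
    xs.foldl (fun r x => ys.foldl (fun r y => max r (g x y)) r) a ≤ c ↔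
      a ≤ c ∧ ∀ x ∈ xs, ∀ y ∈ ys, g x y ≤ c := by
  induction xs generalizing a with
  | nil => simp
  | cons h t ih =>
    simp only [List.foldl_cons, ih, fmax_le_iff, List.mem_cons]
    constructor
    · rintro ⟨⟨h1, h2⟩, h3⟩
      exact ⟨h1, fun x hx => hx.elim (fun e => e ▸ h2) (h3 x)⟩
    · rintro ⟨h1, h2⟩
      exact ⟨⟨h1, h2 h (Or.inl rfl)⟩, fun x hx => h2 x (Or.inr hx)⟩

-- range/index plumbing ------------------------------------------------------

theorem pyRange_shift (a b : Int) :
    PySem.List.pyRange (a + 1) (b + 1) 1 = (PySem.List.pyRange a b 1).map (· + 1) := by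
  rw [PySem.List.pyRange_one, PySem.List.pyRange_one]
  have h : b + 1 - (a + 1) = b - a := by ring
  rw [h, List.map_map]
  exact List.map_congr_left fun k _ => by simp; ring

theorem pyGetD_cons_succ {α : Type} (c : α) (t : List α) (i : Int) (h : 0 ≤ i) (d : α) :
    PySem.List.pyGetD (c :: t) (i + 1) d = PySem.List.pyGetD t i d := by
  obtain ⟨k, rfl⟩ := Int.eq_ofNat_of_zero_le h
  have h1 : (k : Int) + 1 = ((k + 1 : Nat) : Int) := by push_cast; ring
  rw [h1, PySem.List.pyGetD_natCast, PySem.List.pyGetD_natCast]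
  simp

theorem foldl_nested_eq_flatMap {α β γ δ : Type} (g : δ → γ → δ) (L : List α)
    (I : α → List β) (key : α → β → γ) (d : δ) :
    L.foldl (fun d i => (I i).foldl (fun d j => g d (key i j)) d) d
      = (L.flatMap (fun i => (I i).map (key i))).foldl g d := by
    induction L generalizing d with
  | nil => simp
  | cons h t ih =>
    simp only [List.foldl_cons, List.flatMap_cons, List.foldl_append, List.foldl_map, ih]

/-- A's double index loop generates exactly `plist l` -/
theorem ev2_eq (l : List Char) :
    (PySem.List.pyRange 0 (l.length : Int) 1).flatMap (fun i =>
        (PySem.List.pyRange (i + 1) (l.length : Int) 1).map (fun j =>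
          String.ofList [PySem.List.pyGetD l i ' ', PySem.List.pyGetD l j ' ']))
      = plist l := by
  induction l with
  | nil => simp [plist, PySem.List.pyRange_one_eq_nil]
  | cons c t ih =>
    have hn : (((c :: t).length : Nat) : Int) = (t.length : Int) + 1 := by
      simp [List.length_cons]
    rw [hn]
    have hpos : (0 : Int) < (t.length : Int) + 1 := by positivity
    rw [PySem.List.pyRange_one_cons hpos, List.flatMap_cons]
    have hshift0 : PySem.List.pyRange (0 + 1) ((t.length : Int) + 1) 1
        = (PySem.List.pyRange 0 (t.length : Int) 1).map (· + 1) := pyRange_shift 0 _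
    have hchunk :
        (PySem.List.pyRange (0 + 1) ((t.length : Int) + 1) 1).map (fun j =>
            String.ofList [PySem.List.pyGetD (c :: t) 0 ' ', PySem.List.pyGetD (c :: t) j ' '])
          = t.map (fun d => String.ofList [c, d]) := by
      rw [hshift0, List.map_map]
      have h1 : ∀ j ∈ PySem.List.pyRange 0 (t.length : Int) 1,
          ((fun j => String.ofList [PySem.List.pyGetD (c :: t) 0 ' ',
              PySem.List.pyGetD (c :: t) j ' ']) ∘ (· + 1)) j
            = (fun j => String.ofList [c, PySem.List.pyGetD t j ' ']) j := by
        intro j hj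
        have hj0 : 0 ≤ j := (PySem.List.mem_pyRange_one.mp hj).1
        simp [Function.comp, PySem.List.pyGetD_zero_cons, pyGetD_cons_succ c t j hj0]
      rw [List.map_congr_left h1]
      have h2 := PySem.List.map_pyGetD_pyRange_zero' t ' '
      calc (PySem.List.pyRange 0 (t.length : Int) 1).map
              (fun j => String.ofList [c, PySem.List.pyGetD t j ' '])
          = ((PySem.List.pyRange 0 (t.length : Int) 1).map
              (fun j => PySem.List.pyGetD t j ' ')).map (fun d => String.ofList [c, d]) := by
            rw [List.map_map]; rfl
        _ = t.map (fun d => String.ofList [c, d]) := by rw [h2]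
    have hrest :
        (PySem.List.pyRange (0 + 1) ((t.length : Int) + 1) 1).flatMap (fun i =>
            (PySem.List.pyRange (i + 1) ((t.length : Int) + 1) 1).map (fun j =>
              String.ofList [PySem.List.pyGetD (c :: t) i ' ', PySem.List.pyGetD (c :: t) j ' ']))
          = plist t := by
      rw [hshift0, List.flatMap_map]
      rw [← ih]
      simp only [List.flatMap_def]
      have h3 : ∀ i ∈ PySem.List.pyRange 0 (t.length : Int) 1,
          (PySem.List.pyRange (i + 1 + 1) ((t.length : Int) + 1) 1).map (fun j =>
              String.ofList [PySem.List.pyGetD (c :: t) (i + 1) ' ',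
                PySem.List.pyGetD (c :: t) j ' '])
            = (PySem.List.pyRange (i + 1) (t.length : Int) 1).map (fun j =>
              String.ofList [PySem.List.pyGetD t i ' ', PySem.List.pyGetD t j ' ']) := by
        intro i hi
        have hi0 : 0 ≤ i := (PySem.List.mem_pyRange_one.mp hi).1
        rw [pyGetD_cons_succ c t i hi0, pyRange_shift (i + 1) (t.length : Int), List.map_map]
        refine List.map_congr_left fun j hj => ?_
        have hj0 : 0 ≤ j := by
          have := (PySem.List.mem_pyRange_one.mp hj).1
          omega
        simp [Function.comp, pyGetD_cons_succ c t j hj0]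
      rw [List.map_congr_left h3]
    rw [hchunk, hrest]
    simp [plist]

-- counting lemmas -----------------------------------------------------------

theorem ofList_inj (l1 l2 : List Char) : String.ofList l1 = String.ofList l2 ↔ l1 = l2 := by
  constructor
  · intro h
    have := congrArg String.toList h
    simpa using this
  · rintro rfl; rfl

theorem count_map_mk1 (l : List Char) (c : Char) :
    (l.map (fun a => String.ofList [a])).count (String.ofList [c]) = l.count c := by
  induction l with
  | nil => simp
  | cons a t ih => simp [List.count_cons, ih, beq_iff_eq, ofList_inj]

theorem count_chunk (c x y : Char) (t : List Char) :
    (t.map (fun d => String.ofList [c, d])).count (String.ofList [x, y])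
      = if c = x then t.count y else 0 := by
  induction t with
  | nil => simp
  | cons d t ih =>
    by_cases hc : c = x
    · subst hc
      by_cases hd : d = y
      · subst hd
        simp [List.count_cons, ih, ofList_inj]
      · simp [List.count_cons, ih, ofList_inj, hd]
    · have hc' : ¬ x = c := fun h => hc h.symm
      simp [List.count_cons, ih, ofList_inj, hc, hc']

theorem count_plist (x y : Char) (l : List Char) :
    (plist l).count (String.ofList [x, y]) = pcnt x y l := by
  induction l with
  | nil => simp [plist, pcnt]
  | cons c t ih => simp [plist, pcnt, List.count_append, count_chunk, ih]

theorem count_mk1_plist (c : Char) (l : List Char) :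
    (plist l).count (String.ofList [c]) = 0 := by
  induction l with
  | nil => simp [plist]
  | cons a t ih =>
    simp only [plist, List.count_append, ih, Nat.add_zero]
    refine List.count_eq_zero.mpr ?_
    simp only [List.mem_map, not_exists, not_and]
    intro d _ h
    rw [ofList_inj] at h
    simp at h

theorem count_mk2_map1 (x y : Char) (l : List Char) :
    (l.map (fun a => String.ofList [a])).count (String.ofList [x, y]) = 0 := by
  refine List.count_eq_zero.mpr ?_
  simp only [List.mem_map, not_exists, not_and]
  intro a _ h
  rw [ofList_inj] at h
  simp at h

theorem mem_plist (k : String) (l : List Char) (h : k ∈ plist l) :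
    ∃ x y, k = String.ofList [x, y] ∧ x ∈ l ∧ y ∈ l := by
  induction l with
  | nil => simp [plist] at h
  | cons c t ih =>
    simp only [plist, List.mem_append, List.mem_map] at h
    rcases h with ⟨d, hd, rfl⟩ | h
    · exact ⟨c, d, rfl, List.mem_cons_self, List.mem_cons_of_mem _ hd⟩
    · obtain ⟨x, y, rfl, hx, hy⟩ := ih h
      exact ⟨x, y, rfl, List.mem_cons_of_mem _ hx, List.mem_cons_of_mem _ hy⟩

-- B-side loop characterizations ---------------------------------------------

theorem single_fold (x : Char) (l : List Char) :
    l.foldl (fun (k : Int) c => if c = x then k + 1 else k) 0 = (l.count x : Int) := by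
  have h := PySem.List.foldl_ite_add_one (fun c => c = x) l 0
  rw [h]
  simp [List.count_eq_countP]
  congr 1

theorem pair_fold (x y : Char) (l : List Char) (r p : Int) :
    l.foldl (fun (st : Int × Int) c =>
        ((if c = x then st.1 + 1 else st.1), (if c = y then st.2 + st.1 else st.2))) (r, p)
      = (r + l.count x, p + r * (l.count y : Int) + (pcnt x y l : Int)) := by
  induction l generalizing r p with
  | nil => simp [pcnt]
  | cons c t ih =>
    simp only [List.foldl_cons]
    rw [ih]
    simp only [Prod.mk.injEq, List.count_cons, pcnt, beq_iff_eq]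
    refine ⟨?_, ?_⟩ <;> split_ifs <;> push_cast <;> first | ring | simp_all

-- the two sides in canonical form -------------------------------------------

theorem A_canon (s : String) :
    maximumOccurrence s
      = (PySem.Set.ofList (evts s.toList)).foldl
          (fun r k => max r (((evts s.toList).count k : Int))) (-10 ^ 9) := by
  unfold maximumOccurrence
  dsimp only
  have hfreq :
      (PySem.List.pyRange 0 (s.toList.length : Int) 1).foldl
        (fun d i => (PySem.List.pyRange (i + 1) (s.toList.length : Int) 1).foldl
          (fun d j => d.insert
            (String.ofList [PySem.List.pyGetD s.toList i ' ', PySem.List.pyGetD s.toList j ' '])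
            (d.getD (String.ofList
              [PySem.List.pyGetD s.toList i ' ', PySem.List.pyGetD s.toList j ' ']) 0 + 1)) d)
        (s.toList.foldl
          (fun d i => d.insert (String.ofList [i]) (d.getD (String.ofList [i]) 0 + 1))
          (PySem.Dict.empty : PySem.Dict String Int))
      = (evts s.toList).foldl (fun d k => d.insert k (d.getD k 0 + 1)) (PySem.Dict.empty : PySem.Dict String Int) := by
    calc (PySem.List.pyRange 0 (s.toList.length : Int) 1).foldl
          (fun d i => (PySem.List.pyRange (i + 1) (s.toList.length : Int) 1).foldl
            (fun d j => d.insert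
              (String.ofList [PySem.List.pyGetD s.toList i ' ', PySem.List.pyGetD s.toList j ' '])
              (d.getD (String.ofList
                [PySem.List.pyGetD s.toList i ' ', PySem.List.pyGetD s.toList j ' ']) 0 + 1)) d)
          (s.toList.foldl
            (fun d i => d.insert (String.ofList [i]) (d.getD (String.ofList [i]) 0 + 1))
            (PySem.Dict.empty : PySem.Dict String Int))
        = ((PySem.List.pyRange 0 (s.toList.length : Int) 1).flatMap (fun i =>
            (PySem.List.pyRange (i + 1) (s.toList.length : Int) 1).map (fun j =>
              String.ofList [PySem.List.pyGetD s.toList i ' ', PySem.List.pyGetD s.toList j ' ']))).foldl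
            (fun d k => d.insert k (d.getD k 0 + 1))
            (s.toList.foldl
              (fun d i => d.insert (String.ofList [i]) (d.getD (String.ofList [i]) 0 + 1))
              (PySem.Dict.empty : PySem.Dict String Int)) :=
          foldl_nested_eq_flatMap
            (fun (d : PySem.Dict String Int) k => d.insert k (d.getD k 0 + 1))
            (PySem.List.pyRange 0 (s.toList.length : Int) 1)
            (fun i => PySem.List.pyRange (i + 1) (s.toList.length : Int) 1)
            (fun i j => String.ofList
              [PySem.List.pyGetD s.toList i ' ', PySem.List.pyGetD s.toList j ' '])
            (s.toList.foldl
              (fun d i => d.insert (String.ofList [i]) (d.getD (String.ofList [i]) 0 + 1))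
              (PySem.Dict.empty : PySem.Dict String Int))
      _ = (plist s.toList).foldl (fun d k => d.insert k (d.getD k 0 + 1))
            ((s.toList.map (fun c => String.ofList [c])).foldl
              (fun d k => d.insert k (d.getD k 0 + 1)) (PySem.Dict.empty : PySem.Dict String Int)) := by
          rw [ev2_eq]
          congr 1
          rw [List.foldl_map]
      _ = (evts s.toList).foldl (fun d k => d.insert k (d.getD k 0 + 1)) (PySem.Dict.empty : PySem.Dict String Int) := by
          rw [evts, List.foldl_append]
  rw [hfreq]
  rw [PySem.Dict.keys_foldl_insert, PySem.Dict.keys_empty, PySem.Set.update_nil_left]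
  simp only [PySem.Dict.getD_foldl_insert_add_one, PySem.Dict.getD_empty, zero_add]

theorem B_canon (s : String) :
    maximumOccurrence_alt s
      = (PySem.Set.ofList s.toList).foldl
          (fun r x => (PySem.Set.ofList s.toList).foldl
            (fun r y => max r ((pcnt x y s.toList : Int))) r)
          ((PySem.Set.ofList s.toList).foldl
            (fun r c => max r ((s.toList.count c : Int))) (-10 ^ 9)) := by
  unfold maximumOccurrence_alt
  dsimp only
  rw [show (s.toList.foldl (fun cs c => PySem.Set.add cs c) PySem.Set.empty)
        = PySem.Set.ofList s.toList from (PySem.Set.ofList_eq_foldl s.toList).symm]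
  simp only [single_fold, pair_fold, zero_add, zero_mul]

/-- the combinatorial heart: A's max over the pooled frequency dictionary equals
B's max over per-character counts and per-ordered-pair counts -/
theorem canon_eq (l : List Char) :
    (PySem.Set.ofList (evts l)).foldl
        (fun r k => max r (((evts l).count k : Int))) (-10 ^ 9)
      = (PySem.Set.ofList l).foldl
          (fun r x => (PySem.Set.ofList l).foldl
            (fun r y => max r ((pcnt x y l : Int))) r)
          ((PySem.Set.ofList l).foldl
            (fun r c => max r ((l.count c : Int))) (-10 ^ 9)) := by
  have hA := (fmax_le_iff (fun k => ((evts l).count k : Int))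
      (PySem.Set.ofList (evts l)) (-10 ^ 9) _).mp (le_refl _)
  have hS := (fmax_le_iff (fun c => ((l.count c : Int)))
      (PySem.Set.ofList l) (-10 ^ 9) _).mp (le_refl _)
  have hB := (nmax_le_iff (fun x y => ((pcnt x y l : Int)))
      (PySem.Set.ofList l) (PySem.Set.ofList l)
      ((PySem.Set.ofList l).foldl (fun r c => max r ((l.count c : Int))) (-10 ^ 9)) _).mp
      (le_refl _)
  have hcnt1 : ∀ c : Char, ((evts l).count (String.ofList [c]) : Int) = (l.count c : Int) := by
    intro c; simp [evts, List.count_append, count_map_mk1, count_mk1_plist]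
  have hcnt2 : ∀ x y : Char, ((evts l).count (String.ofList [x, y]) : Int) = (pcnt x y l : Int) := by
    intro x y; simp [evts, List.count_append, count_mk2_map1, count_plist]
  -- bound for any single character of l against A's fold
  have hA1 : ∀ c ∈ l, ((l.count c : Int)) ≤ (PySem.Set.ofList (evts l)).foldl
      (fun r k => max r (((evts l).count k : Int))) (-10 ^ 9) := by
    intro c hc
    have hmem : String.ofList [c] ∈ evts l :=
      List.mem_append.mpr (Or.inl (List.mem_map.mpr ⟨c, hc, rfl⟩))
    have := hA.2 _ ((PySem.Set.mem_ofList _ _).mpr hmem)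
    rwa [hcnt1] at this
  apply le_antisymm
  · rw [fmax_le_iff]
    refine ⟨le_trans hS.1 hB.1, ?_⟩
    intro k hk
    rcases List.mem_append.mp ((PySem.Set.mem_ofList _ _).mp hk) with h | h
    · obtain ⟨c, hc, rfl⟩ := List.mem_map.mp h
      rw [hcnt1]
      exact le_trans (hS.2 c ((PySem.Set.mem_ofList _ _).mpr hc)) hB.1
    · obtain ⟨x, y, rfl, hx, hy⟩ := mem_plist _ _ h
      rw [hcnt2]
      exact hB.2 x ((PySem.Set.mem_ofList _ _).mpr hx) y ((PySem.Set.mem_ofList _ _).mpr hy)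
  · rw [nmax_le_iff]
    constructor
    · rw [fmax_le_iff]
      exact ⟨hA.1, fun c hc => hA1 c ((PySem.Set.mem_ofList _ _).mp hc)⟩
    · intro x hx y hy
      by_cases hp : 0 < pcnt x y l
      · have hmem : String.ofList [x, y] ∈ plist l := by
          rw [← List.count_pos_iff, count_plist]
          exact hp
        have := hA.2 _ ((PySem.Set.mem_ofList _ _).mpr (List.mem_append.mpr (Or.inr hmem)))
        rwa [hcnt2] at this
      · have h0 : pcnt x y l = 0 := by omega
        rw [h0]
        have hxl : x ∈ l := (PySem.Set.mem_ofList _ _).mp hx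
        have h1 : (0 : Int) ≤ (l.count x : Int) := by positivity
        simpa using le_trans h1 (hA1 x hxl)

-- ===== VERDICT (by name: the statement is the Claim_ definition above) =====
theorem maximumOccurrence_spec : Claim_equal_maximumOccurrence := by
  intro s _
  unfold Spec_maximumOccurrence
  rw [A_canon, B_canon, canon_eq]
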